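-- pv_equiv track=rewrite | github.com/shaigue/DNA_clustering | clustering_accuracy.py | check_valid_partition
-- ===== SOURCE A (Python) =====
-- def check_valid_partition(partition: list[set[int]]) -> bool:
--     """Checks that a list of sets is indeed a partition, i.e. all the sets are mutually exclusive, and they cover all
--     the samples from 0-n.
--
--     :param partition: this is a list of the clusters
--     :return True if it is a partition, otherwise False
--     """
--     # check pairwise disjunction
--     n = len(partition)
--     for i in range(n):
--         for j in range(n):
--             if i != j:
--                 intersect = partition[i].intersection(partition[j])
--                 if len(intersect) != 0:
--                     return False
--     # check full set
--     union = set()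
--     for subset in partition:
--         union.update(subset)
--     max_value = max(union)
--     return union == set(range(max_value + 1))
-- ===== SOURCE B (Python) =====
-- def check_valid_partition(partition: list[set[int]]) -> bool:
--     union = set()
--     total = 0
--     for s in partition:
--         union |= s
--         total += len(s)
--     if len(union) != total:
--         return False
--     return union == set(range(max(union) + 1))
-- ===== Notes on version B (the rewrite author's own statement) =====
-- stated objective: alternative
-- what changed: Replaces A's pairwise-intersection double loop over all ordered pairs of sets with a single pass that builds the union while summing the set sizes: the sets are pairwise disjoint iff the size sum equals the union's size.
import Mathlib
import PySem

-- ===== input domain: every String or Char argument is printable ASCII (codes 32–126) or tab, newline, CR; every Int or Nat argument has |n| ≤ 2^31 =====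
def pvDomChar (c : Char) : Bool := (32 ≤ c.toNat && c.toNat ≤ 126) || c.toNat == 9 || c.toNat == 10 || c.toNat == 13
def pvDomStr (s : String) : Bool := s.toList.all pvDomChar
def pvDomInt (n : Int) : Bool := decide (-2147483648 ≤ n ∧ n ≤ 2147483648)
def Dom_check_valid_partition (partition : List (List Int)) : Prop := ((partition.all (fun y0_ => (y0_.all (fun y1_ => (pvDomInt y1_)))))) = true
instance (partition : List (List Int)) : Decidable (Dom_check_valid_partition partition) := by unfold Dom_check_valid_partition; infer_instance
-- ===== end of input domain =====

-- B replaces A's pairwise-intersection double loop by a single pass that sums the set sizes while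
-- building the union: the sets are pairwise disjoint iff the size sum equals the union's size.

-- ===== PORT A =====
def check_valid_partition (partition : List (List Int)) : Bool :=
  let sets : List (PySem.Set Int) := partition.map PySem.Set.ofList
  let n : Int := (sets.length : Int)
  -- nested 'for i in range(n): for j in range(n): … return False' = any/any
  if (PySem.List.pyRange 0 n).any (fun i =>
       (PySem.List.pyRange 0 n).any (fun j =>
         i != j &&
           (PySem.Set.len (PySem.Set.inter (PySem.List.pyGetD sets i [])
                                           (PySem.List.pyGetD sets j [])) != 0)))
  then false
  else
    let union : PySem.Set Int := sets.foldl PySem.Set.update PySem.Set.empty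
    match PySem.List.max? union (fun x => x) with
    | none => false   -- here Python's max(union) raises ValueError: excluded by Pre_
    -- set(range(m+1)) is pyRange itself: a range is duplicate-free (Set.ofList_eq_self_of_nodup)
    | some m => PySem.Set.equal union (PySem.List.pyRange 0 (m + 1))

-- ===== PORT B =====
def check_valid_partition_alt (partition : List (List Int)) : Bool :=
  let st : PySem.Set Int × Int := partition.foldl
      (fun p s => (PySem.Set.union p.1 (PySem.Set.ofList s),
                   p.2 + PySem.Set.len (PySem.Set.ofList s)))
      (PySem.Set.empty, 0)
  if PySem.Set.len st.1 != st.2 then false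
  else
    match PySem.List.max? st.1 (fun x => x) with
    | none => false   -- here Python's max(union) raises ValueError: excluded by Pre_
    -- set(range(m+1)) is pyRange itself: a range is duplicate-free (Set.ofList_eq_self_of_nodup)
    | some m => PySem.Set.equal st.1 (PySem.List.pyRange 0 (m + 1))

-- ===== PRECONDITION & SPEC =====
-- Pre_ excludes exactly the inputs on which Python A raises ValueError (max of an empty union),
-- i.e. those where every set of the partition is empty; Python B raises there too.
def Pre_check_valid_partition (partition : List (List Int)) : Prop := partition.flatten ≠ []
instance (partition : List (List Int)) : Decidable (Pre_check_valid_partition partition) := by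
  unfold Pre_check_valid_partition; infer_instance
def pvWitness_check_valid_partition : List (List Int) := [[0, 1], [2]]

def Spec_check_valid_partition (partition : List (List Int)) (out : Bool) : Prop := out = check_valid_partition_alt partition
instance (partition : List (List Int)) (out : Bool) : Decidable (Spec_check_valid_partition partition out) := by unfold Spec_check_valid_partition; infer_instance

-- ===== CLAIM (what is proved, stated in full; the proofs are below) =====
def Claim_equal_check_valid_partition : Prop := ∀ (partition : List (List Int)), Dom_check_valid_partition partition → Pre_check_valid_partition partition → Spec_check_valid_partition partition (check_valid_partition partition)

-- ===== LEMMAS AND PROOFS =====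

-- the pair fold of B computes (the same union A folds, the sum of the set sizes)
theorem pv_fold_pair (L : List (List Int)) (u : PySem.Set Int) (t : Int) :
    L.foldl (fun p s => (PySem.Set.union p.1 (PySem.Set.ofList s),
                         p.2 + PySem.Set.len (PySem.Set.ofList s))) (u, t)
      = ((L.map PySem.Set.ofList).foldl PySem.Set.update u,
         t + ((L.map PySem.Set.ofList).map (fun s => (s.length : Int))).sum) := by
  induction L generalizing u t with
  | nil => simp
  | cons s L ih =>
      simp only [List.foldl_cons, List.map_cons, List.map, List.sum_cons]
      rw [ih]
      simp only [Prod.mk.injEq, PySem.Set.union, PySem.Set.len]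
      exact ⟨trivial, by ring⟩

theorem pv_len_update (u s : PySem.Set Int) (hs : s.Nodup) :
    (PySem.Set.update u s).length = u.length + (s.filter (fun y => !u.contains y)).length := by
  rw [PySem.Set.update_eq_append_filter, PySem.Set.ofList_eq_self_of_nodup s hs]
  simp

theorem pv_len_update_le (u s : PySem.Set Int) (hs : s.Nodup) :
    (PySem.Set.update u s).length ≤ u.length + s.length := by
  rw [pv_len_update u s hs]
  exact Nat.add_le_add_left (List.length_filter_le _ _) _

theorem pv_len_update_eq_iff (u s : PySem.Set Int) (hs : s.Nodup) :
    (PySem.Set.update u s).length = u.length + s.length ↔ ∀ x ∈ s, x ∉ u := by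
  rw [pv_len_update u s hs, Nat.add_left_cancel_iff, List.length_filter_eq_length_iff]
  simp

theorem pv_len_fold_le (L : List (PySem.Set Int)) (hL : ∀ s ∈ L, s.Nodup)
    (u : PySem.Set Int) :
    (L.foldl PySem.Set.update u).length ≤ u.length + (L.map List.length).sum := by
  induction L generalizing u with
  | nil => simp
  | cons s L ih =>
      simp only [List.foldl_cons, List.map_cons, List.sum_cons]
      calc (L.foldl PySem.Set.update (u.update s)).length
          ≤ (u.update s).length + (L.map List.length).sum :=
            ih (fun t ht => hL t (List.mem_cons_of_mem _ ht)) _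
        _ ≤ u.length + s.length + (L.map List.length).sum :=
            Nat.add_le_add_right (pv_len_update_le u s (hL s (List.mem_cons_self))) _
        _ = u.length + (s.length + (L.map List.length).sum) := by omega

-- the size of the folded union equals |u| + Σ|sᵢ| iff all the sets avoid u and are pairwise disjoint
theorem pv_len_fold_update (L : List (PySem.Set Int)) (hL : ∀ s ∈ L, s.Nodup)
    (u : PySem.Set Int) (hu : u.Nodup) :
    (L.foldl PySem.Set.update u).length = u.length + (L.map List.length).sum
      ↔ (∀ s ∈ L, ∀ x ∈ s, x ∉ u) ∧ L.Pairwise (fun s t => ∀ x ∈ s, x ∉ t) := by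
  induction L generalizing u with
  | nil => simp
  | cons s L ih =>
      have hs : s.Nodup := hL s (List.mem_cons_self)
      have hLt : ∀ t ∈ L, List.Nodup t := fun t ht => hL t (List.mem_cons_of_mem _ ht)
      have hu' : (PySem.Set.update u s).Nodup := PySem.Set.nodup_update u s hu
      simp only [List.foldl_cons, List.map_cons, List.sum_cons]
      constructor
      · intro h
        have h1 := pv_len_fold_le L hLt (u.update s)
        have h2 := pv_len_update_le u s hs
        have hlen : (PySem.Set.update u s).length = u.length + s.length := by omega
        have hfold : (L.foldl PySem.Set.update (u.update s)).length
            = (u.update s).length + (L.map List.length).sum := by omega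
        have hdisj : ∀ x ∈ s, x ∉ u := (pv_len_update_eq_iff u s hs).mp hlen
        obtain ⟨havoid, hpw⟩ := (ih hLt _ hu').mp hfold
        refine ⟨?_, ?_⟩
        · intro t ht x hx
          rcases List.mem_cons.mp ht with rfl | ht'
          · exact hdisj x hx
          · exact fun hxu => (havoid t ht' x hx) ((PySem.Set.mem_update u s x).mpr (Or.inl hxu))
        · refine List.Pairwise.cons ?_ hpw
          intro t ht x hx hxt
          exact (havoid t ht x hxt) ((PySem.Set.mem_update u s x).mpr (Or.inr hx))
      · rintro ⟨havoid, hpw⟩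
        rcases List.pairwise_cons.mp hpw with ⟨hhead, hpwL⟩
        have hlen : (PySem.Set.update u s).length = u.length + s.length :=
          (pv_len_update_eq_iff u s hs).mpr (havoid s (List.mem_cons_self))
        have hfold : (L.foldl PySem.Set.update (u.update s)).length
            = (u.update s).length + (L.map List.length).sum := by
          refine (ih hLt _ hu').mpr ⟨?_, hpwL⟩
          intro t ht x hx hxu'
          rcases (PySem.Set.mem_update u s x).mp hxu' with hxu | hxs
          · exact havoid t (List.mem_cons_of_mem _ ht) x hx hxu
          · exact hhead t ht x hxs hx
        omega

-- 'len(a & b) != 0' says the two sets share an element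
theorem pv_inter_len_ne (s t : PySem.Set Int) :
    ¬ PySem.Set.len (PySem.Set.inter s t) = 0 ↔ ∃ x, x ∈ s ∧ x ∈ t := by
  simp only [PySem.Set.len, Nat.cast_eq_zero, List.length_eq_zero_iff]
  constructor
  · intro h
    obtain ⟨x, hx⟩ := List.exists_mem_of_ne_nil _ h
    exact ⟨x, (PySem.Set.mem_inter s t x).mp hx⟩
  · rintro ⟨x, hx⟩ hnil
    exact (List.ne_nil_of_mem ((PySem.Set.mem_inter s t x).mpr hx)) hnil

-- A's nested-loop flag detects exactly a failure of pairwise disjointness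
theorem pv_bad_iff (sets : List (PySem.Set Int)) :
    ((PySem.List.pyRange 0 (sets.length : Int)).any (fun i =>
       (PySem.List.pyRange 0 (sets.length : Int)).any (fun j =>
         i != j &&
           (PySem.Set.len (PySem.Set.inter (PySem.List.pyGetD sets i [])
                                           (PySem.List.pyGetD sets j [])) != 0))) = true)
      ↔ ¬ sets.Pairwise (fun s t => ∀ x ∈ s, x ∉ t) := by
  simp only [List.any_eq_true, Bool.and_eq_true, bne_iff_ne, ne_eq,
    PySem.List.mem_pyRange_one, List.pairwise_iff_getElem, not_forall]
  constructor
  · rintro ⟨i, ⟨hi0, hin⟩, j, ⟨hj0, hjn⟩, hij, hlen⟩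
    have hi' : i.toNat < sets.length := by omega
    have hj' : j.toNat < sets.length := by omega
    rw [PySem.List.pyGetD_eq_getElem sets [] hi0 hin,
        PySem.List.pyGetD_eq_getElem sets [] hj0 hjn] at hlen
    obtain ⟨x, hxi, hxj⟩ := (pv_inter_len_ne _ _).mp hlen
    rcases lt_or_gt_of_ne (show i.toNat ≠ j.toNat by omega) with h | h
    · exact ⟨i.toNat, j.toNat, hi', hj', h, x, hxi, fun hc => hc hxj⟩
    · exact ⟨j.toNat, i.toNat, hj', hi', h, x, hxj, fun hc => hc hxi⟩
  · rintro ⟨i, j, hi, hj, hij, x, hxi, hxj⟩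
    refine ⟨(i : Int), ⟨by omega, by omega⟩, (j : Int), ⟨by omega, by omega⟩, by omega, ?_⟩
    rw [PySem.List.pyGetD_eq_getElem sets [] (by omega) (by omega),
        PySem.List.pyGetD_eq_getElem sets [] (by omega) (by omega)]
    simp only [Int.toNat_natCast]
    exact (pv_inter_len_ne _ _).mpr ⟨x, hxi, not_not.mp hxj⟩

-- ===== VERDICT (by name: the statement is the Claim_ definition above) =====
theorem check_valid_partition_spec : Claim_equal_check_valid_partition := by
  intro partition _hdom _hpre
  unfold Spec_check_valid_partition
  simp only [check_valid_partition, check_valid_partition_alt]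
  rw [pv_fold_pair partition PySem.Set.empty 0]
  dsimp only
  have hnodup : ∀ s ∈ partition.map PySem.Set.ofList, List.Nodup s := by
    intro s hs
    obtain ⟨l, -, rfl⟩ := List.mem_map.mp hs
    exact PySem.Set.nodup_ofList l
  have hsum : ((partition.map PySem.Set.ofList).map (fun s => (s.length : Int))).sum
      = ((((partition.map PySem.Set.ofList)).map List.length).sum : Int) := by
    rw [Nat.cast_list_sum]
    simp only [List.map_map]
    rfl
  have hlen := pv_len_fold_update (partition.map PySem.Set.ofList) hnodup [] List.nodup_nil
  by_cases hp : (partition.map PySem.Set.ofList).Pairwise (fun s t => ∀ x ∈ s, x ∉ t)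
  · have hNat : ((partition.map PySem.Set.ofList).foldl PySem.Set.update []).length
        = ((partition.map PySem.Set.ofList).map List.length).sum := by
      simpa using hlen.mpr ⟨by simp, hp⟩
    have hB : ¬ ((PySem.Set.len ((partition.map PySem.Set.ofList).foldl PySem.Set.update PySem.Set.empty)
        != (0 + ((partition.map PySem.Set.ofList).map (fun s => (s.length : Int))).sum)) = true) := by
      simp only [bne_iff_ne, ne_eq, not_not, PySem.Set.len, zero_add, hsum]
      exact_mod_cast hNat
    rw [if_neg (fun h => (pv_bad_iff _).mp h hp), if_neg hB]
  · have hNat : ¬ ((partition.map PySem.Set.ofList).foldl PySem.Set.update []).length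
        = ((partition.map PySem.Set.ofList).map List.length).sum := by
      intro h
      exact hp (hlen.mp (by simpa using h)).2
    have hB : ((PySem.Set.len ((partition.map PySem.Set.ofList).foldl PySem.Set.update PySem.Set.empty)
        != (0 + ((partition.map PySem.Set.ofList).map (fun s => (s.length : Int))).sum)) = true) := by
      simp only [bne_iff_ne, ne_eq, PySem.Set.len, zero_add, hsum]
      exact_mod_cast hNat
    rw [if_pos ((pv_bad_iff _).mpr hp), if_pos hB]
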